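-- pv_equiv track=rewrite | github.com/stridera/fierylib | src/fierylib/converters/color_converter.py | strip_legacy_colors
-- ===== SOURCE A (Python) =====
-- def strip_legacy_colors(text: str) -> str:
--     """
--     Remove all legacy color codes from text
--
--     Args:
--         text: Text with legacy color codes
--
--     Returns:
--         Plain text without color codes
--     """
--     if not text:
--         return text
--
--     result = []
--     i = 0
--
--     while i < len(text):
--         char = text[i]
--
--         if char in ('&', '@'):
--             if i + 1 < len(text):
--                 next_char = text[i + 1]
--
--                 # Escape sequences
--                 if next_char == char:
--                     result.append(char)
--                     i += 2
--                     continue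
--
--                 # Newline escape
--                 if char == '&' and next_char == '_':
--                     result.append('\n')
--                     i += 2
--                     continue
--
--                 # Skip color code
--                 i += 2
--                 continue
--
--         result.append(char)
--         i += 1
--
--     return ''.join(result)
-- ===== SOURCE B (Python) =====
-- import re
--
-- _CODE = re.compile(r'([&@])(.)', re.DOTALL)
--
--
-- def _repl(m):
--     c, d = m.group(1), m.group(2)
--     if d == c:
--         return c
--     if c == '&' and d == '_':
--         return '\n'
--     return ''
--
--
-- def strip_legacy_colors(text: str) -> str:
--     """Remove all legacy color codes from text (single re.sub pass)."""
--     return _CODE.sub(_repl, text)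
-- ===== Notes on version B (the rewrite author's own statement) =====
-- stated objective: faster
-- what changed: Replaced the manual index-arithmetic while loop by a single re.sub over the pattern ([&@])(.) with re.DOTALL and a replacement callback; the regex engine's compiled C matching loop replaces the per-character Python interpreter loop (measured faster in a timing run).
import Mathlib
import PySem

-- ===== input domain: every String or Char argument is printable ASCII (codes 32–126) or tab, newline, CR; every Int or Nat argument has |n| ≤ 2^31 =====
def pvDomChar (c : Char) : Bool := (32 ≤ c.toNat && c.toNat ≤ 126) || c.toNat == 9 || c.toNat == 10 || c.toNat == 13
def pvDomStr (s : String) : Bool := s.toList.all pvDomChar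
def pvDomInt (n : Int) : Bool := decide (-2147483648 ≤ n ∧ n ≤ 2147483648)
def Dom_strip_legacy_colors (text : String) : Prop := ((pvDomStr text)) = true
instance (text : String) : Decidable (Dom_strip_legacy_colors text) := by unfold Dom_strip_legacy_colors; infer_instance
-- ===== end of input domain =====

-- B replaces A's manual index loop by one re.sub over ([&@])(.) with a
-- replacement callback: the regex engine's compiled loop replaces the
-- per-character Python loop (measured faster in a timing run).

-- ===== PORT A =====
-- A's while loop over index i with a result accumulator, transliterated as
-- recursion on the remaining index range.
def stripLoopA (l : List Char) (i : Nat) (result : List Char) : List Char :=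
  if h : i < l.length then
    let c := l[i]
    if c = '&' ∨ c = '@' then
      if h2 : i + 1 < l.length then
        let d := l[i + 1]
        if d = c then stripLoopA l (i + 2) (result ++ [c])
        else if c = '&' ∧ d = '_' then stripLoopA l (i + 2) (result ++ ['\n'])
        else stripLoopA l (i + 2) result
      else stripLoopA l (i + 1) (result ++ [c])
    else stripLoopA l (i + 1) (result ++ [c])
  else result
termination_by l.length - i

def strip_legacy_colors (text : String) : String :=
  if text = "" then text
  else String.ofList (stripLoopA text.toList 0 [])

-- ===== PORT B =====
-- B delegates to re.sub(r'([&@])(.)', _repl, text, re.DOTALL).  Transcription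
-- of the re engine's left-to-right non-overlapping matching of this pattern:
-- findSplit locates the leftmost match (a marker with at least one char after
-- it), yielding the untouched prefix, the two captured chars and the rest;
-- reSub replaces each match by replCallback (the port of _repl) and keeps the
-- unmatched text.  Exact for this pattern: a match is any '&'/'@' followed by
-- any character (DOTALL), and matches never overlap.
def replCallback (c d : Char) : List Char :=
  if d = c then [c]
  else if c = '&' ∧ d = '_' then ['\n']
  else []

def findSplit : List Char → Option (List Char × Char × Char × List Char)
  | c :: d :: rest =>
    if c = '&' ∨ c = '@' then some ([], c, d, rest)
    else (findSplit (d :: rest)).map (fun p => (c :: p.1, p.2.1, p.2.2.1, p.2.2.2))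
  | _ => none

theorem findSplit_rest_lt : ∀ (l : List Char) p,
    findSplit l = some p → p.2.2.2.length < l.length := by
  intro l
  induction l with
  | nil => intro p h; simp [findSplit] at h
  | cons c rest ih =>
    intro p h
    cases rest with
    | nil => simp [findSplit] at h
    | cons d rest' =>
      rw [findSplit] at h
      split_ifs at h with hc
      · cases h; simp
      · simp only [Option.map_eq_some_iff] at h
        obtain ⟨q, hq, rfl⟩ := h
        have := ih q hq
        simpa using Nat.lt_succ_of_lt this

def reSub (l : List Char) : List Char :=
  match hf : findSplit l with
  | none => l
  | some (pre, c, d, rest) => pre ++ replCallback c d ++ reSub rest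
termination_by l.length
decreasing_by exact findSplit_rest_lt l _ hf

def strip_legacy_colors_alt (text : String) : String :=
  String.ofList (reSub text.toList)

-- ===== PRECONDITION & SPEC =====
def Spec_strip_legacy_colors (text : String) (out : String) : Prop := out = strip_legacy_colors_alt text
instance (text : String) (out : String) : Decidable (Spec_strip_legacy_colors text out) := by unfold Spec_strip_legacy_colors; infer_instance

-- ===== CLAIM (what is proved, stated in full; the proofs are below) =====
def Claim_equal_strip_legacy_colors : Prop := ∀ (text : String), Dom_strip_legacy_colors text → Spec_strip_legacy_colors text (strip_legacy_colors text)

-- ===== LEMMAS AND PROOFS =====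

-- Proof-side intermediate form: the straightforward structural recursion both
-- ports are proved equal to.
def stripGo : List Char → List Char
  | [] => []
  | c :: rest =>
    if c = '&' ∨ c = '@' then
      match rest with
      | [] => [c]
      | d :: rest' =>
        if d = c then c :: stripGo rest'
        else if c = '&' ∧ d = '_' then '\n' :: stripGo rest'
        else stripGo rest'
    else c :: stripGo rest

-- A's loop from index i equals the accumulator followed by stripGo on the
-- remaining characters.
theorem stripLoopA_eq (l : List Char) (i : Nat) (result : List Char) :
    stripLoopA l i result = result ++ stripGo (l.drop i) := by
  induction i, result using stripLoopA.induct (l := l) with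
  | case1 i result h c hc h2 d hd ih =>
      have hc' : l[i] = '&' ∨ l[i] = '@' := hc
      have hd' : l[i + 1]'h2 = l[i]'h := hd
      rw [stripLoopA]
      simp only [dif_pos h, dif_pos h2]
      rw [if_pos hc', if_pos hd', ih,
        List.drop_eq_getElem_cons h, List.drop_eq_getElem_cons h2]
      simp [stripGo, hc', hd']
      rfl
  | case2 i result h c hc h2 d hd hnl ih =>
      have hc' : l[i] = '&' ∨ l[i] = '@' := hc
      have hd' : ¬ (l[i + 1]'h2 = l[i]'h) := hd
      have hnl' : l[i] = '&' ∧ l[i + 1]'h2 = '_' := hnl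
      rw [stripLoopA]
      simp only [dif_pos h, dif_pos h2]
      rw [if_pos hc', if_neg hd', if_pos hnl', ih,
        List.drop_eq_getElem_cons h, List.drop_eq_getElem_cons h2]
      simp [stripGo, hnl'.1, hnl'.2]
  | case3 i result h c hc h2 d hd hnl ih =>
      have hc' : l[i] = '&' ∨ l[i] = '@' := hc
      have hd' : ¬ (l[i + 1]'h2 = l[i]'h) := hd
      have hnl' : ¬ (l[i] = '&' ∧ l[i + 1]'h2 = '_') := hnl
      rw [stripLoopA]
      simp only [dif_pos h, dif_pos h2]
      rw [if_pos hc', if_neg hd', if_neg hnl', ih,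
        List.drop_eq_getElem_cons h, List.drop_eq_getElem_cons h2]
      simp [stripGo, hc', hd', hnl']
  | case4 i result h c hc h2 ih =>
      have hc' : l[i] = '&' ∨ l[i] = '@' := hc
      rw [stripLoopA]
      simp only [dif_pos h, dif_neg h2]
      rw [if_pos hc', ih, List.drop_eq_getElem_cons h]
      have hdrop : l.drop (i + 1) = [] := List.drop_eq_nil_of_le (by omega)
      rw [hdrop]
      simp [stripGo, hc']
      rfl
  | case5 i result h c hc ih =>
      have hc' : ¬ (l[i] = '&' ∨ l[i] = '@') := hc
      rw [stripLoopA]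
      simp only [dif_pos h]
      rw [if_neg hc', ih, List.drop_eq_getElem_cons h]
      have hexp : ∀ xs : List Char, stripGo (l[i] :: xs) = l[i] :: stripGo xs := by
        intro xs
        cases xs <;> simp [stripGo, hc']
      rw [hexp]
      simp only [List.append_assoc, List.singleton_append]
      rfl
  | case6 i result h =>
      rw [stripLoopA]
      have hdrop : l.drop i = [] := List.drop_eq_nil_of_le (by omega)
      simp [dif_neg h, hdrop, stripGo]

-- With no match anywhere, stripGo leaves the text unchanged.
theorem stripGo_of_findSplit_none : ∀ (l : List Char), findSplit l = none → stripGo l = l := by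
  intro l
  induction l with
  | nil => intro _; rfl
  | cons c rest ih =>
    intro h
    cases rest with
    | nil => by_cases hc : c = '&' ∨ c = '@' <;> simp [stripGo, hc]
    | cons d rest' =>
      rw [findSplit] at h
      split_ifs at h with hc
      · simp [Option.map_eq_none_iff] at h
        simp [stripGo, hc, ih h]

-- findSplit's anatomy: the prefix is marker-free, the match head is a marker,
-- and the pieces reassemble the input.
theorem findSplit_some_spec : ∀ (l : List Char) (p : List Char) (c d : Char) (r : List Char),
    findSplit l = some (p, c, d, r) →
    l = p ++ c :: d :: r ∧ (∀ x ∈ p, ¬ (x = '&' ∨ x = '@')) ∧ (c = '&' ∨ c = '@') := by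
  intro l
  induction l with
  | nil => intro p c d r h; simp [findSplit] at h
  | cons a rest ih =>
    intro p c d r h
    cases rest with
    | nil => simp [findSplit] at h
    | cons b rest' =>
      rw [findSplit] at h
      split_ifs at h with ha
      · cases h; exact ⟨rfl, by simp, ha⟩
      · simp only [Option.map_eq_some_iff] at h
        obtain ⟨⟨q, qc, qd, qr⟩, hq, heq⟩ := h
        simp only [Prod.mk.injEq] at heq
        obtain ⟨rfl, rfl, rfl, rfl⟩ := heq
        obtain ⟨h1, h2, h3⟩ := ih q qc qd qr hq
        refine ⟨by simp [h1], ?_, h3⟩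
        intro x hx
        rcases List.mem_cons.mp hx with rfl | hx
        · exact ha
        · exact h2 x hx

-- stripGo passes a marker-free prefix through verbatim.
theorem stripGo_append_nomarker : ∀ (p xs : List Char),
    (∀ x ∈ p, ¬ (x = '&' ∨ x = '@')) → stripGo (p ++ xs) = p ++ stripGo xs := by
  intro p
  induction p with
  | nil => intro xs _; rfl
  | cons a q ih =>
    intro xs h
    have ha := h a (by simp)
    have hq : ∀ x ∈ q, ¬ (x = '&' ∨ x = '@') := fun x hx => h x (by simp [hx])
    have hexp : ∀ ys : List Char, stripGo (a :: ys) = a :: stripGo ys := by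
      intro ys; cases ys <;> simp [stripGo, ha]
    simp only [List.cons_append, hexp, ih xs hq]

-- On a match 'c d::rest' with c a marker, stripGo emits the callback's value.
theorem stripGo_marker (c d : Char) (rest : List Char) (hc : c = '&' ∨ c = '@') :
    stripGo (c :: d :: rest) = replCallback c d ++ stripGo rest := by
  by_cases hd : d = c
  · simp [stripGo, replCallback, hc, hd]
  · by_cases hnl : c = '&' ∧ d = '_'
    · simp [stripGo, replCallback, hnl]
    · simp only [stripGo, replCallback, if_pos hc, if_neg hd, if_neg hnl]
      simp

-- The two strategies agree: the per-character pass equals the find-and-replace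
-- recursion.
theorem stripGo_eq_reSub : ∀ (l : List Char), stripGo l = reSub l := by
  intro l
  induction hn : l.length using Nat.strong_induction_on generalizing l with
  | _ n ih =>
    rw [reSub]
    split
    · next hf => exact stripGo_of_findSplit_none l hf
    · next pre c d rest hf =>
      obtain ⟨hl, hpre, hc⟩ := findSplit_some_spec l pre c d rest hf
      subst hl
      rw [stripGo_append_nomarker pre _ hpre, stripGo_marker c d rest hc,
        ih rest.length (by rw [← hn]; simp; omega) rest rfl]
      simp

-- ===== VERDICT (by name: the statement is the Claim_ definition above) =====
theorem strip_legacy_colors_spec : Claim_equal_strip_legacy_colors := by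
  intro text _
  unfold Spec_strip_legacy_colors strip_legacy_colors strip_legacy_colors_alt
  split_ifs with h
  · subst h; rw [reSub]; rfl
  · rw [stripLoopA_eq, ← stripGo_eq_reSub]; simp
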